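-- pv_equiv track=rewrite | github.com/ayushjaiswal/Web-Crawler | multi_search.py | multi_lookup
-- ===== SOURCE A (Python) =====
-- def multi_lookup(index, query):
-- 	urls=[]
-- 	p={}
-- 	for word in query:
-- 		if word not in index:
-- 			return []
-- 		entries=lookup(index,word)
-- 		for entry in entries:
-- 			if entry[0] in p:
-- 				p[entry[0]].append(entry[1])
-- 			else:
-- 				p[entry[0]]=[entry[1]]
-- 	for url in p:
-- 		found=1
-- 		for i in range(1,len(p[url])):
-- 			if p[url][i]-p[url][i-1]!=1:
-- 				found=0
-- 				break
-- 		if found == 1 and url not in urls: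
-- 			urls.append(url)
-- 	return urls
--
-- def lookup(index, keyword):
-- 	if keyword in index:
-- 		return index[keyword]
-- 	else:
-- 		return None
-- ===== SOURCE B (Python) =====
-- def multi_lookup(index, query):
--     state = {}
--     for word in query:
--         entries = index.get(word)
--         if entries is None:
--             return []
--         for url, pos in entries:
--             if url in state:
--                 last, ok = state[url]
--                 state[url] = (pos, ok and pos - last == 1)
--             else:
--                 state[url] = (pos, True)
--     return [url for url, (_, ok) in state.items() if ok]
-- ===== Notes on version B (the rewrite author's own statement) =====
-- stated objective: alternative
-- what changed: B fuses indexing and verification into one pass: instead of accumulating full per-url position lists and then re-scanning each list for consecutiveness in a second loop, B keeps only (last_position, consecutive_flag) per url, updated on the fly, and emits the flagged urls; B also avoids the unnecessary 'url not in urls' membership scan.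
import Mathlib
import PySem

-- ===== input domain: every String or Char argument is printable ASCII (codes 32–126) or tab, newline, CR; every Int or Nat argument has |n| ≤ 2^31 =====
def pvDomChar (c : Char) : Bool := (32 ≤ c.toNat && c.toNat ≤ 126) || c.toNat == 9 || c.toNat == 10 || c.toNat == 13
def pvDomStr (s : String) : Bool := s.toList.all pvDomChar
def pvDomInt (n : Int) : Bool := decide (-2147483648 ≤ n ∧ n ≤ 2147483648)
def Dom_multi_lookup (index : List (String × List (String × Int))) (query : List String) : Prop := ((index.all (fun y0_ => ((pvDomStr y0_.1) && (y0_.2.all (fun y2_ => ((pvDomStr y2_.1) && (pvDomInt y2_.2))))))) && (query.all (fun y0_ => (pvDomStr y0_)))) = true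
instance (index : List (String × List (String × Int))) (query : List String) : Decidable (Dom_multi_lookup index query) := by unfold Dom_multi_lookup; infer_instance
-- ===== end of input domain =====

-- B fuses A's two phases into one pass keeping only (last position, consecutive flag) per url
-- instead of full position lists plus a second verification loop; alternative decomposition, not claimed faster.

-- ===== PORT A =====
-- helper 'lookup' of A: index[keyword] if present else None
def mlA_lookup (index : PySem.Dict String (List (String × Int))) (keyword : String) : Option (List (String × Int)) :=
  if index.contains keyword then index.get? keyword else none

-- A's inner range(1, len) loop computing 'found' (break = return 0)
def mlA_found : List Int → Int
  | [] => 1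
  | [_] => 1
  | a :: b :: rest => if b - a ≠ 1 then 0 else mlA_found (b :: rest)

-- body of 'for entry in entries'
def mlA_step (p : PySem.Dict String (List Int)) (entry : String × Int) : PySem.Dict String (List Int) :=
  if p.contains entry.1 then p.modify entry.1 [] (· ++ [entry.2]) else p.insert entry.1 [entry.2]

-- 'for word in query' with the early 'return []' encoded as none
def mlA_build (index : PySem.Dict String (List (String × Int))) :
    List String → PySem.Dict String (List Int) → Option (PySem.Dict String (List Int))
  | [], p => some p
  | word :: rest, p =>
    if index.contains word then
      -- 'word in index' was just checked, so mlA_lookup returns some; .getD [] only discharges the Option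
      mlA_build index rest (((mlA_lookup index word).getD []).foldl mlA_step p)
    else none

def multi_lookup (index : List (String × List (String × Int))) (query : List String) : List String :=
  match mlA_build (PySem.Dict.mk index) query PySem.Dict.empty with
  | none => []
  | some p =>
    p.keys.foldl (fun urls url =>
      if mlA_found (p.getD url []) == 1 && !(urls.contains url) then urls ++ [url] else urls) []

-- ===== PORT B =====
def mlB_step (st : PySem.Dict String (Int × Bool)) (e : String × Int) : PySem.Dict String (Int × Bool) :=
  match st.get? e.1 with
  | some (last, ok) => st.insert e.1 (e.2, ok && (e.2 - last == 1))
  | none => st.insert e.1 (e.2, true)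

def mlB_build (index : PySem.Dict String (List (String × Int))) :
    List String → PySem.Dict String (Int × Bool) → Option (PySem.Dict String (Int × Bool))
  | [], st => some st
  | word :: rest, st =>
    match index.get? word with
    | none => none
    | some entries => mlB_build index rest (entries.foldl mlB_step st)

def multi_lookup_alt (index : List (String × List (String × Int))) (query : List String) : List String :=
  match mlB_build (PySem.Dict.mk index) query PySem.Dict.empty with
  | none => []
  | some st => (st.items.filter (fun kv => kv.2.2)).map (·.1)

-- ===== PRECONDITION & SPEC =====
def Spec_multi_lookup (index : List (String × List (String × Int))) (query : List String) (out : List String) : Prop := out = multi_lookup_alt index query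
instance (index : List (String × List (String × Int))) (query : List String) (out : List String) : Decidable (Spec_multi_lookup index query out) := by unfold Spec_multi_lookup; infer_instance

-- ===== CLAIM (what is proved, stated in full; the proofs are below) =====
def Claim_equal_multi_lookup : Prop := ∀ (index : List (String × List (String × Int))) (query : List String), Dom_multi_lookup index query → Spec_multi_lookup index query (multi_lookup index query)

-- ===== LEMMAS AND PROOFS =====

-- B's running flag, as a function of A's accumulated position list
def mlFlag : List Int → Bool
  | [] => true
  | [_] => true
  | a :: b :: rest => (b - a == 1) && mlFlag (b :: rest)

def mlG (v : List Int) : Int × Bool := (v.getLastD 0, mlFlag v)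
def mlF (kv : String × List Int) : String × (Int × Bool) := (kv.1, mlG kv.2)

-- invariant relating A's dict of position lists to B's dict of (last, flag)
def mlInv (p : PySem.Dict String (List Int)) (st : PySem.Dict String (Int × Bool)) : Prop :=
  st.items = p.items.map mlF ∧ p.keys.Nodup ∧ ∀ kv ∈ p.items, kv.2 ≠ []

theorem mlA_found_eq : ∀ v, mlA_found v = if mlFlag v then 1 else 0
  | [] => rfl
  | [_] => rfl
  | a :: b :: rest => by
    simp only [mlA_found, mlFlag]
    by_cases h : b - a = 1
    · simp [h, mlA_found_eq (b :: rest)]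
    · simp [h]

theorem mlFlag_append : ∀ (v : List Int), v ≠ [] → ∀ x, mlFlag (v ++ [x]) = (mlFlag v && (x - v.getLastD 0 == 1))
  | [], h, _ => absurd rfl h
  | [a], _, x => by simp [mlFlag]
  | a :: b :: rest, _, x => by
    have ih := mlFlag_append (b :: rest) (by simp) x
    simp only [List.cons_append] at ih ⊢
    simp only [mlFlag, ih, List.getLastD_cons]
    cases h1 : (b - a == 1) <;> simp

theorem mlG_append (v : List Int) (h : v ≠ []) (x : Int) :
    mlG (v ++ [x]) = (x, mlFlag v && (x - v.getLastD 0 == 1)) := by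
  simp [mlG, mlFlag_append v h x]

theorem ml_find_map (l : List (String × List Int)) (k : String) :
    List.find? (fun q => q.1 == k) (l.map mlF) = (List.find? (fun q => q.1 == k) l).map mlF := by
  induction l with
  | nil => rfl
  | cons a t ih =>
    simp only [List.map_cons, List.find?_cons]
    by_cases h : a.1 = k
    · simp [mlF, h]
    · have h' : (a.1 == k) = false := by simp [h]
      have h'' : ((mlF a).1 == k) = false := h'
      simp [h', h'', ih]

theorem ml_get?_rel (p : PySem.Dict String (List Int)) (st : PySem.Dict String (Int × Bool))
    (hit : st.items = p.items.map mlF) (k : String) : st.get? k = (p.get? k).map mlG := by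
  simp only [PySem.Dict.get?, hit]
  rw [ml_find_map]
  cases List.find? (fun q => q.1 == k) p.items <;> rfl

theorem ml_contains_rel (p : PySem.Dict String (List Int)) (st : PySem.Dict String (Int × Bool))
    (hit : st.items = p.items.map mlF) (k : String) : st.contains k = p.contains k := by
  rw [PySem.Dict.contains_eq_isSome_get?, PySem.Dict.contains_eq_isSome_get?, ml_get?_rel p st hit k]
  cases p.get? k <;> rfl

theorem ml_step_inv (p : PySem.Dict String (List Int)) (st : PySem.Dict String (Int × Bool))
    (e : String × Int) (h : mlInv p st) : mlInv (mlA_step p e) (mlB_step st e) := by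
  obtain ⟨hit, hnd, hne⟩ := h
  obtain ⟨u, x⟩ := e
  have hget := ml_get?_rel p st hit u
  have hcont := ml_contains_rel p st hit u
  cases hp : p.get? u with
  | none =>
    have hc : p.contains u = false := by
      rw [PySem.Dict.contains_eq_isSome_get?, hp]; rfl
    have hc' : st.contains u = false := by rw [hcont, hc]
    have hmem : u ∉ p.keys := by
      intro hm
      rw [← PySem.Dict.contains_iff_mem_keys] at hm
      simp [hc] at hm
    rw [hp, Option.map_none] at hget
    refine ⟨?_, ?_, ?_⟩
    · simp [mlA_step, mlB_step, hc, hget, PySem.Dict.insert, hc', hit]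
      rfl
    · have hk : (mlA_step p (u, x)).keys = p.keys ++ [u] := by
        simp only [mlA_step, hc, Bool.false_eq_true, if_false]
        exact PySem.Dict.keys_insert_of_not_contains p [x] hc
      rw [hk, List.nodup_append]
      refine ⟨hnd, by simp, ?_⟩
      intro a ha b hb
      simp only [List.mem_singleton] at hb
      subst hb
      exact fun he => hmem (he ▸ ha)
    · intro kv hkv
      simp only [mlA_step, hc, PySem.Dict.insert, Bool.false_eq_true, if_false,
        List.mem_append, List.mem_singleton] at hkv
      rcases hkv with hkv | hkv
      · exact hne kv hkv
      · subst hkv; simp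
  | some v =>
    have hc : p.contains u = true := by
      rw [PySem.Dict.contains_eq_isSome_get?, hp]; rfl
    have hc' : st.contains u = true := by rw [hcont, hc]
    have hvne : v ≠ [] := hne (u, v) (PySem.Dict.mem_items_of_get?_eq_some p hp)
    rw [hp] at hget
    have hstep : mlB_step st (u, x) = st.insert u (x, mlFlag v && (x - v.getLastD 0 == 1)) := by
      simp [mlB_step, hget, mlG]
    have hA : mlA_step p (u, x) = p.insert u (v ++ [x]) := by
      simp [mlA_step, hc, PySem.Dict.modify, PySem.Dict.getD, hp]
    refine ⟨?_, ?_, ?_⟩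
    · rw [hstep, hA]
      simp only [PySem.Dict.insert, hc, hc', if_pos, hit, List.map_map]
      apply List.map_congr_left
      intro kv hkv
      by_cases hk : kv.1 = u
      · simp [Function.comp, mlF, hk, mlG_append v hvne x]
      · simp [Function.comp, mlF, hk]
    · rw [hA, PySem.Dict.keys_insert_of_contains p (v ++ [x]) hc]; exact hnd
    · intro kv hkv
      rw [hA] at hkv
      simp only [PySem.Dict.insert, hc, if_pos, List.mem_map] at hkv
      obtain ⟨q, hq, hq2⟩ := hkv
      by_cases hk : q.1 = u
      · simp only [hk, beq_self_eq_true, if_pos] at hq2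
        subst hq2; simp
      · rw [if_neg (by simp [hk])] at hq2
        subst hq2; exact hne q hq

theorem ml_fold_inv (es : List (String × Int)) (p : PySem.Dict String (List Int))
    (st : PySem.Dict String (Int × Bool)) (h : mlInv p st) :
    mlInv (es.foldl mlA_step p) (es.foldl mlB_step st) := by
  induction es generalizing p st with
  | nil => exact h
  | cons e t ih => exact ih _ _ (ml_step_inv p st e h)

theorem ml_build_rel (d : PySem.Dict String (List (String × Int))) (q : List String)
    (p : PySem.Dict String (List Int)) (st : PySem.Dict String (Int × Bool)) (h : mlInv p st) :
    (mlA_build d q p = none ∧ mlB_build d q st = none) ∨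
    (∃ p' st', mlA_build d q p = some p' ∧ mlB_build d q st = some st' ∧ mlInv p' st') := by
  induction q generalizing p st with
  | nil => exact Or.inr ⟨p, st, rfl, rfl, h⟩
  | cons w rest ih =>
    cases hw : d.get? w with
    | none =>
      have hc : d.contains w = false := by
        rw [PySem.Dict.contains_eq_isSome_get?, hw]; rfl
      exact Or.inl ⟨by simp [mlA_build, hc], by simp [mlB_build, hw]⟩
    | some es =>
      have hc : d.contains w = true := by
        rw [PySem.Dict.contains_eq_isSome_get?, hw]; rfl
      have hA : mlA_build d (w :: rest) p = mlA_build d rest (es.foldl mlA_step p) := by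
        simp [mlA_build, hc, mlA_lookup, hw]
      have hB : mlB_build d (w :: rest) st = mlB_build d rest (es.foldl mlB_step st) := by
        simp [mlB_build, hw]
      rw [hA, hB]
      exact ih _ _ (ml_fold_inv es p st h)

theorem ml_foldl_dedup (l : List String) (c : String → Bool) :
    ∀ (acc : List String), l.Nodup → (∀ x ∈ l, x ∉ acc) →
    l.foldl (fun urls url => if c url && !(urls.contains url) then urls ++ [url] else urls) acc
      = acc ++ l.filter c := by
  induction l with
  | nil => intro acc _ _; simp
  | cons x t ih =>
    intro acc hnd hdisj
    have hx : acc.contains x = false := by simpa using hdisj x (by simp)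
    have hxt : x ∉ t := (List.nodup_cons.mp hnd).1
    have hd' : ∀ y ∈ t, y ∉ acc ++ [x] := by
      intro y hy
      have hyx : y ≠ x := fun he => hxt (he ▸ hy)
      simp [List.mem_append, hdisj y (by simp [hy]), hyx]
    simp only [List.foldl_cons, hx, Bool.not_false, Bool.and_true, List.filter_cons]
    by_cases hcx : c x = true
    · rw [if_pos hcx]
      rw [if_pos hcx]
      rw [ih (acc ++ [x]) (List.nodup_cons.mp hnd).2 hd']
      simp
    · rw [if_neg hcx]
      rw [if_neg hcx]
      rw [ih acc (List.nodup_cons.mp hnd).2 (fun y hy => hdisj y (by simp [hy]))]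

theorem ml_out_eq (p : PySem.Dict String (List Int)) (st : PySem.Dict String (Int × Bool))
    (h : mlInv p st) :
    p.keys.foldl (fun urls url =>
      if mlA_found (p.getD url []) == 1 && !(urls.contains url) then urls ++ [url] else urls) []
    = (st.items.filter (fun kv => kv.2.2)).map (·.1) := by
  obtain ⟨hit, hnd, hne⟩ := h
  rw [ml_foldl_dedup p.keys (fun url => mlA_found (p.getD url []) == 1) [] hnd (by simp)]
  rw [List.nil_append]
  have hkeys : p.keys = p.items.map (·.1) := rfl
  rw [hit, hkeys, List.filter_map, List.filter_map, List.map_map]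
  apply congrArg (List.map _)
  apply List.filter_congr
  intro kv hkv
  obtain ⟨k0, v0⟩ := kv
  have hgd : p.getD k0 [] = v0 := PySem.Dict.getD_of_mem_items p hkv hnd []
  simp only [Function.comp, hgd, mlA_found_eq, mlF, mlG]
  cases hf : mlFlag v0 <;> simp

theorem ml_main (index : List (String × List (String × Int))) (query : List String) :
    multi_lookup index query = multi_lookup_alt index query := by
  unfold multi_lookup multi_lookup_alt
  have h0 : mlInv PySem.Dict.empty PySem.Dict.empty := ⟨rfl, List.nodup_nil, by simp [PySem.Dict.empty]⟩
  rcases ml_build_rel (PySem.Dict.mk index) query PySem.Dict.empty PySem.Dict.empty h0 with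
    ⟨hA, hB⟩ | ⟨p', st', hA, hB, hinv⟩
  · rw [hA, hB]
  · rw [hA, hB]
    exact ml_out_eq p' st' hinv

-- ===== VERDICT (by name: the statement is the Claim_ definition above) =====
theorem multi_lookup_spec : Claim_equal_multi_lookup := by
  intro index query _
  unfold Spec_multi_lookup
  exact ml_main index query
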